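-- pv_equiv track=rewrite | github.com/T-R0D/JustForFun | aoc2018/aoc2018/day22/solution.py | search_for_target
-- ===== SOURCE A (Python) =====
-- import heapq
--
-- def search_for_target(target, region_types):
--     NOTHING_EQUIPPED = 0x00
--     TORCH = 0x01
--     CLIMBING_GEAR = 0x02
--
--     EQUIPMENT_FOR_REGION_TYPE = {
--         0: {CLIMBING_GEAR, TORCH},
--         1: {CLIMBING_GEAR, NOTHING_EQUIPPED},
--         2: {TORCH, NOTHING_EQUIPPED},
--     }
--
--     frontier = [(0, TORCH, (0, 0))]
--     seen = set()
--
--     while frontier: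
--         t, current_equipment, (i, j) = heapq.heappop(frontier)
--
--         if (i, j) == target and current_equipment == TORCH:
--             return t
--
--         if ((i, j), current_equipment) in seen:
--             continue
--
--         current_region_type = region_types[i][j]
--         for d_i, d_j in ((-1, 0), (1, 0), (0, -1), (0, 1)):
--             r, s = i + d_i, j + d_j
--
--             if r < 0 or len(region_types) <= r or s < 0 or len(region_types[0]) <= s:
--                 continue
--
--             candidate_region_type = region_types[r][s]
--
--             if current_region_type == candidate_region_type:
--
--                 heapq.heappush(frontier, (t + 1, current_equipment, (r, s)))
--                 continue
--
--             equipment_required_to_move = list(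
--                 EQUIPMENT_FOR_REGION_TYPE[current_region_type]
--                 & EQUIPMENT_FOR_REGION_TYPE[candidate_region_type]
--             )[0]
--             if current_equipment == equipment_required_to_move:
--                 heapq.heappush(frontier, (t + 1, current_equipment, (r, s)))
--
--         next_equipment = list(
--             EQUIPMENT_FOR_REGION_TYPE[current_region_type] - {current_equipment}
--         )[0]
--         heapq.heappush(frontier, (t + 7, next_equipment, (i, j)))
--
--         seen.add(((i, j), current_equipment))
--
--     return -1
-- ===== SOURCE B (Python) =====
-- def search_for_target(target, region_types):
--     # gear codes: 0 = nothing, 1 = torch, 2 = climbing gear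
--     VALID = {0: (1, 2), 1: (0, 2), 2: (0, 1)}  # region type -> gears usable there
--     frontier = [(0, 1, (0, 0))]
--     seen = set()
--     while frontier:
--         entry = min(frontier)
--         frontier.remove(entry)
--         t, gear, (i, j) = entry
--         if (i, j) == target and gear == 1:
--             return t
--         if ((i, j), gear) in seen:
--             continue
--         seen.add(((i, j), gear))
--         rt = region_types[i][j]
--         for r, s in ((i - 1, j), (i + 1, j), (i, j - 1), (i, j + 1)):
--             if 0 <= r < len(region_types) and 0 <= s < len(region_types[0]):
--                 nt = region_types[r][s]
--                 if rt == nt or (gear in VALID[rt] and gear in VALID[nt]):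
--                     frontier.append((t + 1, gear, (r, s)))
--         frontier.append((t + 7, min(v for v in VALID[rt] if v != gear), (i, j)))
--     return -1
-- ===== Notes on version B (the rewrite author's own statement) =====
-- stated objective: simpler
-- what changed: B drops the binary heap and the set algebra: the frontier is a plain list popped by scanning for its minimum entry (min + remove), and the gear rules are a region-to-valid-gears table consulted by membership tests (move if the regions match or the current gear is valid in both; switch to the smallest other valid gear) instead of materialising set intersections/differences and indexing into them.
-- outside the precondition, e.g. on search_for_target((0, 1), [[0, 0, 9]]): A returns 1, B returns 1; on search_for_target((0, 1), [[0, 0], [0]]): A returns 1, B returns 1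
import Mathlib
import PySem

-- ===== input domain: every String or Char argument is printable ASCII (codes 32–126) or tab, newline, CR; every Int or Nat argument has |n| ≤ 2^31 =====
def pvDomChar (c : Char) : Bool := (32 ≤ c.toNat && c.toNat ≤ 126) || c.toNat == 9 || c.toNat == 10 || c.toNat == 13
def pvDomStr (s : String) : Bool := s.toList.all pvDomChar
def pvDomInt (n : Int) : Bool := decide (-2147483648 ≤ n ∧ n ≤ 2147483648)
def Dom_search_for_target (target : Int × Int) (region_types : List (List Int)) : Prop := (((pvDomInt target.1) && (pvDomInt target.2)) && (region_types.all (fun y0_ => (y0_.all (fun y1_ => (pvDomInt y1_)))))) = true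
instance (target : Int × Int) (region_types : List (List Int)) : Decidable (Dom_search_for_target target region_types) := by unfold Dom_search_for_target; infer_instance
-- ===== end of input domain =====

-- B replaces A's heap by a plain scan-for-minimum frontier and A's set algebra by direct membership
-- tests against a region→valid-gears table: simpler, not faster.

-- ===== PORT A =====

-- Python tuple '<' on (t, equipment, (i, j))
def pvELT (a b : Int × Int × Int × Int) : Bool :=
  decide (a.1 < b.1) || (decide (a.1 = b.1) && (decide (a.2.1 < b.2.1) ||
    (decide (a.2.1 = b.2.1) && (decide (a.2.2.1 < b.2.2.1) ||
      (decide (a.2.2.1 = b.2.2.1) && decide (a.2.2.2 < b.2.2.2))))))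

-- heapq modeled as a min-priority queue kept as an ascending list: heappush = ordered insert,
-- heappop = take the head.  Exact for the sequence of popped VALUES, which is all A observes of
-- the heap: heappop returns the minimum entry under Python tuple order, equal tuples are equal values.
def pvHeapPush (x : Int × Int × Int × Int) : List (Int × Int × Int × Int) → List (Int × Int × Int × Int)
  | [] => [x]
  | y :: ys => if pvELT y x then y :: pvHeapPush x ys else x :: y :: ys

-- EQUIPMENT_FOR_REGION_TYPE[t], its elements listed in CPython's iteration order for these
-- small-int sets (ascending).  A KeyError (t outside {0,1,2}) is excluded by Pre_; the else
-- branch there is never reached on admitted inputs.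
def pvEquipFor (t : Int) : List Int :=
  if t = 0 then [1, 2] else if t = 1 then [0, 2] else [0, 1]

-- list(E[a] & E[b])[0]  (singleton on admitted inputs; headD default unreachable under Pre_)
def pvInterFirst (a b : Int) : Int :=
  (((pvEquipFor a).filter (fun g => (pvEquipFor b).contains g)).headD 0)

-- list(E[t] - {g})[0]
def pvDiffFirst (t g : Int) : Int :=
  (((pvEquipFor t).filter (fun e => e != g)).headD 0)

-- the while loop of A; fuel bounds the number of pops (16*rows*cols+16 provably suffices:
-- at most 3*rows*cols states are ever processed, each pushing at most 5 entries)
def pvLoopA (target : Int × Int) (grid : List (List Int)) :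
    Nat → List (Int × Int × Int × Int) → PySem.Set ((Int × Int) × Int) → Int
  | 0, _, _ => -1
  | _ + 1, [], _ => -1
  | fuel + 1, (t, g, i, j) :: rest, seen =>
    if (i, j) = target ∧ g = 1 then t
    else if PySem.Set.contains seen ((i, j), g) then pvLoopA target grid fuel rest seen
    else
      let rt := PySem.List.pyGetD (PySem.List.pyGetD grid i []) j 0
      let fr1 := List.foldl (fun fr (d : Int × Int) =>
          let r := i + d.1
          let s := j + d.2
          if r < 0 ∨ (grid.length : Int) ≤ r ∨ s < 0 ∨ ((PySem.List.pyGetD grid 0 []).length : Int) ≤ s then fr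
          else
            let nt := PySem.List.pyGetD (PySem.List.pyGetD grid r []) s 0
            if rt = nt then pvHeapPush (t + 1, g, r, s) fr
            else if g = pvInterFirst rt nt then pvHeapPush (t + 1, g, r, s) fr
            else fr)
        rest [((-1 : Int), (0 : Int)), (1, 0), (0, -1), (0, 1)]
      pvLoopA target grid fuel (pvHeapPush (t + 7, pvDiffFirst rt g, i, j) fr1)
        (PySem.Set.add seen ((i, j), g))

def search_for_target (target : Int × Int) (region_types : List (List Int)) : Int :=
  pvLoopA target region_types
    (16 * region_types.length * (region_types.headD []).length + 16)
    [(0, 1, 0, 0)] PySem.Set.empty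

-- ===== PORT B =====

-- min(frontier): fold Python tuple '<' over the list (first minimal element; ties are equal values)
def pvMinFold (x : Int × Int × Int × Int) (xs : List (Int × Int × Int × Int)) : Int × Int × Int × Int :=
  xs.foldl (fun m y => if pvELT y m then y else m) x

-- VALID[t] (a dict of tuples in Source B); a KeyError (t outside {0,1,2}) is excluded by Pre_,
-- the else branch there is never reached on admitted inputs
def pvValidFor (t : Int) : List Int :=
  if t = 0 then [1, 2] else if t = 1 then [0, 2] else [0, 1]

def pvLoopB (target : Int × Int) (grid : List (List Int)) :
    Nat → List (Int × Int × Int × Int) → PySem.Set ((Int × Int) × Int) → Int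
  | 0, _, _ => -1
  | _ + 1, [], _ => -1
  | fuel + 1, h :: tl, seen =>
    let e := pvMinFold h tl                 -- entry = min(frontier)
    let fr := (h :: tl).erase e             -- frontier.remove(entry)
    match e with
    | (t, g, i, j) =>
      if (i, j) = target ∧ g = 1 then t
      else if PySem.Set.contains seen ((i, j), g) then pvLoopB target grid fuel fr seen
      else
        let seen' := PySem.Set.add seen ((i, j), g)
        let rt := PySem.List.pyGetD (PySem.List.pyGetD grid i []) j 0
        let fr2 := List.foldl (fun acc (p : Int × Int) =>
            let r := p.1
            let s := p.2
            if 0 ≤ r ∧ r < (grid.length : Int) ∧ 0 ≤ s ∧ s < ((PySem.List.pyGetD grid 0 []).length : Int) then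
              let nt := PySem.List.pyGetD (PySem.List.pyGetD grid r []) s 0
              if rt = nt ∨ ((pvValidFor rt).contains g = true ∧ (pvValidFor nt).contains g = true) then acc ++ [(t + 1, g, r, s)] else acc
            else acc)
          fr [(i - 1, j), (i + 1, j), (i, j - 1), (i, j + 1)]
        -- min(v for v in VALID[rt] if v != gear); never empty on admitted inputs (Python's
        -- ValueError on an empty min is unreachable), headD 0 is its stand-in
        let cand := (pvValidFor rt).filter (fun v => v != g)
        let ng := List.foldl (fun m y => if y < m then y else m) (cand.headD 0) cand.tail
        pvLoopB target grid fuel (fr2 ++ [(t + 7, ng, i, j)]) seen'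

def search_for_target_alt (target : Int × Int) (region_types : List (List Int)) : Int :=
  pvLoopB target region_types
    (16 * region_types.length * (region_types.headD []).length + 16)
    [(0, 1, 0, 0)] PySem.Set.empty

-- ===== PRECONDITION & SPEC =====
-- Pre_ excludes (unless target = (0,0), answered before any grid access) grids that are empty,
-- ragged, or contain a region type other than 0,1,2: on those A raises IndexError/KeyError as
-- soon as it expands a malformed cell; it can still return when the search ends first, and B
-- agrees there, but that value depends on which cells happen to be expanded.
def Pre_search_for_target (target : Int × Int) (region_types : List (List Int)) : Prop :=
  target = (0, 0) ∨
    (region_types ≠ [] ∧ 0 < (region_types.headD []).length ∧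
      (∀ row ∈ region_types, row.length = (region_types.headD []).length) ∧
      (∀ row ∈ region_types, ∀ v ∈ row, v = 0 ∨ v = 1 ∨ v = 2))
instance (target : Int × Int) (region_types : List (List Int)) : Decidable (Pre_search_for_target target region_types) := by unfold Pre_search_for_target; infer_instance

def pvWitness_search_for_target : (Int × Int) × List (List Int) := ((1, 1), [[0, 1], [2, 0]])

def Spec_search_for_target (target : Int × Int) (region_types : List (List Int)) (out : Int) : Prop := out = search_for_target_alt target region_types
instance (target : Int × Int) (region_types : List (List Int)) (out : Int) : Decidable (Spec_search_for_target target region_types out) := by unfold Spec_search_for_target; infer_instance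

-- ===== CLAIM (what is proved, stated in full; the proofs are below) =====
def Claim_equal_search_for_target : Prop := ∀ (target : Int × Int) (region_types : List (List Int)), Dom_search_for_target target region_types → Pre_search_for_target target region_types → Spec_search_for_target target region_types (search_for_target target region_types)

-- ===== LEMMAS AND PROOFS =====

-- ---- the strict tuple order pvELT is a linear order ----

lemma pvELT_iff (a b : Int × Int × Int × Int) :
    pvELT a b = true ↔ (a.1 < b.1 ∨ (a.1 = b.1 ∧ (a.2.1 < b.2.1 ∨ (a.2.1 = b.2.1 ∧
      (a.2.2.1 < b.2.2.1 ∨ (a.2.2.1 = b.2.2.1 ∧ a.2.2.2 < b.2.2.2)))))) := by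
  simp [pvELT]

lemma pvELT_false_iff (a b : Int × Int × Int × Int) :
    pvELT a b = false ↔ ¬ (a.1 < b.1 ∨ (a.1 = b.1 ∧ (a.2.1 < b.2.1 ∨ (a.2.1 = b.2.1 ∧
      (a.2.2.1 < b.2.2.1 ∨ (a.2.2.1 = b.2.2.1 ∧ a.2.2.2 < b.2.2.2)))))) := by
  rw [← pvELT_iff, Bool.eq_false_iff]

lemma pvELT_asymm {a b : Int × Int × Int × Int} (h : pvELT a b = true) : pvELT b a = false := by
  rw [pvELT_iff] at h; rw [pvELT_false_iff]; omega

lemma pvELT_antisymm {a b : Int × Int × Int × Int} (h1 : pvELT a b = false)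
    (h2 : pvELT b a = false) : a = b := by
  rw [pvELT_false_iff] at h1 h2
  simp only [Prod.ext_iff]
  omega

lemma pvELT_trans {a b c : Int × Int × Int × Int} (h1 : pvELT a b = true)
    (h2 : pvELT b c = true) : pvELT a c = true := by
  rw [pvELT_iff] at h1 h2 ⊢; omega

lemma pvLE_trans {a b c : Int × Int × Int × Int} (h1 : pvELT b a = false)
    (h2 : pvELT c b = false) : pvELT c a = false := by
  rw [pvELT_false_iff] at h1 h2 ⊢; omega

lemma pvBool_false {x : Bool} (h : ¬ x = true) : x = false := by
  cases x
  · rfl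
  · exact absurd rfl h

-- ---- pvHeapPush: a heap push is a cons up to permutation and preserves sortedness ----

lemma perm_heapPush (x : Int × Int × Int × Int) :
    ∀ l, (pvHeapPush x l).Perm (x :: l)
  | [] => List.Perm.refl _
  | y :: ys => by
    simp only [pvHeapPush]
    split
    · exact ((perm_heapPush x ys).cons y).trans (List.Perm.swap x y ys)
    · exact List.Perm.refl _

lemma mem_heapPush {x z : Int × Int × Int × Int} {l : List (Int × Int × Int × Int)} :
    z ∈ pvHeapPush x l ↔ z = x ∨ z ∈ l := by
  rw [(perm_heapPush x l).mem_iff]; simp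

lemma sorted_heapPush {x : Int × Int × Int × Int} {l : List (Int × Int × Int × Int)}
    (h : l.Pairwise (fun a b => pvELT b a = false)) :
    (pvHeapPush x l).Pairwise (fun a b => pvELT b a = false) := by
  induction l with
  | nil => simp [pvHeapPush]
  | cons y ys ih =>
    rcases List.pairwise_cons.1 h with ⟨hy, hys⟩
    simp only [pvHeapPush]
    split
    · rename_i hlt
      refine List.pairwise_cons.2 ⟨?_, ih hys⟩
      intro z hz
      rcases mem_heapPush.1 hz with rfl | hz
      · exact pvELT_asymm hlt
      · exact hy z hz
    · rename_i hnlt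
      have hxy : pvELT y x = false := pvBool_false hnlt
      refine List.pairwise_cons.2 ⟨?_, h⟩
      intro z hz
      rcases List.mem_cons.1 hz with rfl | hz
      · exact hxy
      · exact pvLE_trans hxy (hy z hz)

-- ---- min over a list: Python min(frontier) picks the head of a sorted permutation ----

lemma minFold_of_le {x : Int × Int × Int × Int} {l : List (Int × Int × Int × Int)}
    (h : ∀ y ∈ l, pvELT y x = false) : pvMinFold x l = x := by
  induction l with
  | nil => rfl
  | cons y ys ih =>
    have hy : pvELT y x = false := h y (List.mem_cons_self ..)
    simp only [pvMinFold, List.foldl_cons, hy, Bool.false_eq_true, if_false]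
    exact ih fun z hz => h z (List.mem_cons_of_mem _ hz)

def pvMin2 (m : Option (Int × Int × Int × Int)) (y : Int × Int × Int × Int) :
    Option (Int × Int × Int × Int) :=
  match m with
  | none => some y
  | some m => some (if pvELT y m then y else m)

def pvOptMin (l : List (Int × Int × Int × Int)) : Option (Int × Int × Int × Int) :=
  l.foldl pvMin2 none

lemma min2_sym (a b : Int × Int × Int × Int) :
    (if pvELT b a then b else a) = (if pvELT a b then a else b) := by
  by_cases h : pvELT b a = true
  · rw [if_pos h, if_neg (by simp [pvELT_asymm h])]
  · have hba := pvBool_false h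
    rw [if_neg h]
    by_cases h2 : pvELT a b = true
    · rw [if_pos h2]
    · rw [if_neg h2]
      exact pvELT_antisymm (pvBool_false h2) hba

lemma pvMin2_rcomm (m : Option (Int × Int × Int × Int)) (a b : Int × Int × Int × Int) :
    pvMin2 (pvMin2 m a) b = pvMin2 (pvMin2 m b) a := by
  cases m with
  | none => simp only [pvMin2]; exact congrArg some (min2_sym a b)
  | some m =>
    simp only [pvMin2]
    by_cases h1 : pvELT a m = true <;> by_cases h2 : pvELT b m = true
    · rw [if_pos h1, if_pos h2]
      exact congrArg some (min2_sym a b)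
    · have hba : pvELT b a = false := by
        cases hh : pvELT b a with
        | false => rfl
        | true => exact absurd (pvELT_trans hh h1) h2
      rw [if_pos h1, if_neg h2, hba, if_pos h1]
      simp
    · have hab : pvELT a b = false := by
        cases hh : pvELT a b with
        | false => rfl
        | true => exact absurd (pvELT_trans hh h2) h1
      rw [if_neg h1, if_pos h2, hab]
      simp
    · rw [if_neg h1, if_neg h2, if_neg h1]

lemma optMin_cons (x : Int × Int × Int × Int) (l : List (Int × Int × Int × Int)) :
    pvOptMin (x :: l) = some (pvMinFold x l) := by
  suffices h : ∀ (l : List (Int × Int × Int × Int)) (a : Int × Int × Int × Int),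
      List.foldl pvMin2 (some a) l = some (pvMinFold a l) from h l x
  intro l
  induction l with
  | nil => intro a; rfl
  | cons y ys ih =>
    intro a
    have hstep : pvMin2 (some a) y = some (if pvELT y a then y else a) := rfl
    simp only [List.foldl_cons, hstep, ih, pvMinFold]

lemma optMin_perm {l l' : List (Int × Int × Int × Int)} (h : l.Perm l') :
    pvOptMin l = pvOptMin l' :=
  @List.Perm.foldl_eq _ _ pvMin2 _ _ ⟨pvMin2_rcomm⟩ h none

lemma min_of_sorted_perm {x h' : Int × Int × Int × Int}
    {l tl' : List (Int × Int × Int × Int)}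
    (hs : (x :: l).Pairwise (fun a b => pvELT b a = false))
    (hp : (x :: l).Perm (h' :: tl')) : pvMinFold h' tl' = x := by
  have h1 := optMin_cons x l
  have h2 := optMin_cons h' tl'
  have h3 := optMin_perm hp
  have h4 : pvMinFold x l = x := minFold_of_le (List.pairwise_cons.1 hs).1
  rw [h1, h4] at h3
  rw [h2] at h3
  exact (Option.some.injEq ..).mp h3.symm

-- ---- grid facts ----

lemma pvRow0 (grid : List (List Int)) : PySem.List.pyGetD grid 0 [] = grid.headD [] := by
  cases grid <;> simp [PySem.List.pyGetD_zero, List.getD]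

def pvGood (grid : List (List Int)) (e : Int × Int × Int × Int) : Prop :=
  0 ≤ e.2.2.1 ∧ e.2.2.1 < (grid.length : Int) ∧ 0 ≤ e.2.2.2 ∧
    e.2.2.2 < ((PySem.List.pyGetD grid 0 []).length : Int) ∧
    (e.2.1 = 0 ∨ e.2.1 = 1 ∨ e.2.1 = 2)

lemma pvGood_mk (grid : List (List Int)) (t g i j : Int) :
    pvGood grid (t, g, i, j) ↔ (0 ≤ i ∧ i < (grid.length : Int) ∧ 0 ≤ j ∧
      j < ((PySem.List.pyGetD grid 0 []).length : Int) ∧ (g = 0 ∨ g = 1 ∨ g = 2)) := Iff.rfl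

lemma cell_mem (grid : List (List Int))
    (hrect : ∀ row ∈ grid, row.length = (PySem.List.pyGetD grid 0 []).length)
    (hvals : ∀ row ∈ grid, ∀ v ∈ row, v = 0 ∨ v = 1 ∨ v = 2)
    {r s : Int} (hr0 : 0 ≤ r) (hr : r < (grid.length : Int)) (hs0 : 0 ≤ s)
    (hs : s < ((PySem.List.pyGetD grid 0 []).length : Int)) :
    PySem.List.pyGetD (PySem.List.pyGetD grid r []) s 0 = 0 ∨
    PySem.List.pyGetD (PySem.List.pyGetD grid r []) s 0 = 1 ∨
    PySem.List.pyGetD (PySem.List.pyGetD grid r []) s 0 = 2 := by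
  have hrow : PySem.List.pyGetD grid r [] ∈ grid :=
    PySem.List.pyGetD_mem _ _ ⟨by omega, hr⟩
  have hlen := hrect _ hrow
  have hv : PySem.List.pyGetD (PySem.List.pyGetD grid r []) s 0 ∈ PySem.List.pyGetD grid r [] :=
    PySem.List.pyGetD_mem _ _ ⟨by omega, by omega⟩
  exact hvals _ hrow _ hv

-- ---- the gear arithmetic of B matches the set algebra of A on region types 0,1,2 ----

lemma ngB_eq {rt g : Int} (hrt : rt = 0 ∨ rt = 1 ∨ rt = 2) (hg : g = 0 ∨ g = 1 ∨ g = 2) :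
    List.foldl (fun m y => if y < m then y else m)
      (((pvValidFor rt).filter (fun v => v != g)).headD 0)
      ((pvValidFor rt).filter (fun v => v != g)).tail = pvDiffFirst rt g := by
  rcases hrt with rfl | rfl | rfl <;> rcases hg with rfl | rfl | rfl <;> decide

lemma inter_iff {rt nt g : Int} (hrt : rt = 0 ∨ rt = 1 ∨ rt = 2)
    (hnt : nt = 0 ∨ nt = 1 ∨ nt = 2) (hg : g = 0 ∨ g = 1 ∨ g = 2) (hne : ¬ rt = nt) :
    g = pvInterFirst rt nt ↔
      ((pvValidFor rt).contains g = true ∧ (pvValidFor nt).contains g = true) := by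
  rcases hrt with rfl | rfl | rfl <;> rcases hnt with rfl | rfl | rfl <;>
    rcases hg with rfl | rfl | rfl <;> first | (exact absurd rfl hne) | decide

lemma diff_mem {rt g : Int} (hrt : rt = 0 ∨ rt = 1 ∨ rt = 2) (hg : g = 0 ∨ g = 1 ∨ g = 2) :
    pvDiffFirst rt g = 0 ∨ pvDiffFirst rt g = 1 ∨ pvDiffFirst rt g = 2 := by
  rcases hrt with rfl | rfl | rfl <;> rcases hg with rfl | rfl | rfl <;> decide

-- ---- the neighbour loop: A's conditional heap pushes match B's conditional appends ----

lemma fold_perm (grid : List (List Int))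
    (hrect : ∀ row ∈ grid, row.length = (PySem.List.pyGetD grid 0 []).length)
    (hvals : ∀ row ∈ grid, ∀ v ∈ row, v = 0 ∨ v = 1 ∨ v = 2)
    (t g i j rt : Int) (hg : g = 0 ∨ g = 1 ∨ g = 2) (hrt : rt = 0 ∨ rt = 1 ∨ rt = 2) :
    ∀ (ds : List (Int × Int)) (frA frB : List (Int × Int × Int × Int)),
      frA.Perm frB → (∀ e ∈ frA, pvGood grid e) →
      frA.Pairwise (fun a b => pvELT b a = false) →
      (List.foldl (fun fr (d : Int × Int) =>
          let r := i + d.1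
          let s := j + d.2
          if r < 0 ∨ (grid.length : Int) ≤ r ∨ s < 0 ∨ ((PySem.List.pyGetD grid 0 []).length : Int) ≤ s then fr
          else
            let nt := PySem.List.pyGetD (PySem.List.pyGetD grid r []) s 0
            if rt = nt then pvHeapPush (t + 1, g, r, s) fr
            else if g = pvInterFirst rt nt then pvHeapPush (t + 1, g, r, s) fr
            else fr) frA ds).Perm
        (List.foldl (fun acc (p : Int × Int) =>
          let r := p.1
          let s := p.2
          if 0 ≤ r ∧ r < (grid.length : Int) ∧ 0 ≤ s ∧ s < ((PySem.List.pyGetD grid 0 []).length : Int) then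
            let nt := PySem.List.pyGetD (PySem.List.pyGetD grid r []) s 0
            if rt = nt ∨ ((pvValidFor rt).contains g = true ∧ (pvValidFor nt).contains g = true) then acc ++ [(t + 1, g, r, s)] else acc
          else acc) frB (ds.map (fun d => (i + d.1, j + d.2)))) ∧
      (∀ e ∈ (List.foldl (fun fr (d : Int × Int) =>
          let r := i + d.1
          let s := j + d.2
          if r < 0 ∨ (grid.length : Int) ≤ r ∨ s < 0 ∨ ((PySem.List.pyGetD grid 0 []).length : Int) ≤ s then fr
          else
            let nt := PySem.List.pyGetD (PySem.List.pyGetD grid r []) s 0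
            if rt = nt then pvHeapPush (t + 1, g, r, s) fr
            else if g = pvInterFirst rt nt then pvHeapPush (t + 1, g, r, s) fr
            else fr) frA ds), pvGood grid e) ∧
      (List.foldl (fun fr (d : Int × Int) =>
          let r := i + d.1
          let s := j + d.2
          if r < 0 ∨ (grid.length : Int) ≤ r ∨ s < 0 ∨ ((PySem.List.pyGetD grid 0 []).length : Int) ≤ s then fr
          else
            let nt := PySem.List.pyGetD (PySem.List.pyGetD grid r []) s 0
            if rt = nt then pvHeapPush (t + 1, g, r, s) fr
            else if g = pvInterFirst rt nt then pvHeapPush (t + 1, g, r, s) fr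
            else fr) frA ds).Pairwise (fun a b => pvELT b a = false) := by
  intro ds
  induction ds with
  | nil => intro frA frB hp hG hs; exact ⟨hp, hG, hs⟩
  | cons d ds ih =>
    intro frA frB hp hG hs
    simp only [List.map_cons, List.foldl_cons]
    by_cases hb : 0 ≤ i + d.1 ∧ i + d.1 < (grid.length : Int) ∧ 0 ≤ j + d.2 ∧
        j + d.2 < ((PySem.List.pyGetD grid 0 []).length : Int)
    case neg =>
      rw [if_pos (show i + d.1 < 0 ∨ (grid.length : Int) ≤ i + d.1 ∨ j + d.2 < 0 ∨
            ((PySem.List.pyGetD grid 0 []).length : Int) ≤ j + d.2 by omega),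
          if_neg hb]
      exact ih frA frB hp hG hs
    case pos =>
      rw [if_neg (show ¬(i + d.1 < 0 ∨ (grid.length : Int) ≤ i + d.1 ∨ j + d.2 < 0 ∨
            ((PySem.List.pyGetD grid 0 []).length : Int) ≤ j + d.2) by omega),
          if_pos hb]
      have hnt := cell_mem grid hrect hvals (r := i + d.1) (s := j + d.2)
        hb.1 hb.2.1 hb.2.2.1 hb.2.2.2
      have hGood : pvGood grid (t + 1, g, i + d.1, j + d.2) :=
        (pvGood_mk ..).mpr ⟨hb.1, hb.2.1, hb.2.2.1, hb.2.2.2, hg⟩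
      have hpush : ∀ frA frB, frA.Perm frB → (∀ e ∈ frA, pvGood grid e) →
          frA.Pairwise (fun a b => pvELT b a = false) →
          (pvHeapPush (t + 1, g, i + d.1, j + d.2) frA).Perm (frB ++ [(t + 1, g, i + d.1, j + d.2)]) ∧
          (∀ e ∈ pvHeapPush (t + 1, g, i + d.1, j + d.2) frA, pvGood grid e) ∧
          (pvHeapPush (t + 1, g, i + d.1, j + d.2) frA).Pairwise (fun a b => pvELT b a = false) := by
        intro frA frB hp hG hs
        refine ⟨((perm_heapPush _ frA).trans (hp.cons _)).trans
          (List.perm_append_singleton _ frB).symm, ?_, sorted_heapPush hs⟩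
        intro e he
        rcases mem_heapPush.1 he with rfl | he
        · exact hGood
        · exact hG e he
      by_cases hrtnt : rt = PySem.List.pyGetD (PySem.List.pyGetD grid (i + d.1) []) (j + d.2) 0
      · rw [if_pos hrtnt,
            if_pos (show rt = PySem.List.pyGetD (PySem.List.pyGetD grid (i + d.1) []) (j + d.2) 0 ∨
              ((pvValidFor rt).contains g = true ∧
                (pvValidFor (PySem.List.pyGetD (PySem.List.pyGetD grid (i + d.1) []) (j + d.2) 0)).contains g = true)
              from Or.inl hrtnt)]
        obtain ⟨h1, h2, h3⟩ := hpush frA frB hp hG hs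
        exact ih _ _ h1 h2 h3
      · rw [if_neg hrtnt]
        have hint := inter_iff hrt hnt hg hrtnt
        by_cases hgi : g = pvInterFirst rt (PySem.List.pyGetD (PySem.List.pyGetD grid (i + d.1) []) (j + d.2) 0)
        · rw [if_pos hgi,
              if_pos (show rt = PySem.List.pyGetD (PySem.List.pyGetD grid (i + d.1) []) (j + d.2) 0 ∨
                ((pvValidFor rt).contains g = true ∧
                  (pvValidFor (PySem.List.pyGetD (PySem.List.pyGetD grid (i + d.1) []) (j + d.2) 0)).contains g = true)
                from Or.inr (hint.mp hgi))]
          obtain ⟨h1, h2, h3⟩ := hpush frA frB hp hG hs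
          exact ih _ _ h1 h2 h3
        · rw [if_neg hgi,
              if_neg (show ¬(rt = PySem.List.pyGetD (PySem.List.pyGetD grid (i + d.1) []) (j + d.2) 0 ∨
                ((pvValidFor rt).contains g = true ∧
                  (pvValidFor (PySem.List.pyGetD (PySem.List.pyGetD grid (i + d.1) []) (j + d.2) 0)).contains g = true)) by
                rintro (h | h)
                · exact hrtnt h
                · exact hgi (hint.mpr h))]
          exact ih frA frB hp hG hs

-- ---- main loop equivalence ----

lemma loop_eq (target : Int × Int) (grid : List (List Int))
    (hrect : ∀ row ∈ grid, row.length = (PySem.List.pyGetD grid 0 []).length)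
    (hvals : ∀ row ∈ grid, ∀ v ∈ row, v = 0 ∨ v = 1 ∨ v = 2) :
    ∀ (fuel : Nat) (frA frB : List (Int × Int × Int × Int)) (seen : PySem.Set ((Int × Int) × Int)),
      frA.Pairwise (fun a b => pvELT b a = false) → frA.Perm frB →
      (∀ e ∈ frA, pvGood grid e) →
      pvLoopA target grid fuel frA seen = pvLoopB target grid fuel frB seen := by
  intro fuel
  induction fuel with
  | zero => intro frA frB seen _ _ _; rfl
  | succ n ih =>
    intro frA frB seen hs hp hG
    cases frA with
    | nil =>
      have hB : frB = [] := hp.symm.eq_nil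
      subst hB; rfl
    | cons x l =>
      cases frB with
      | nil => exact absurd hp.eq_nil (by simp)
      | cons h' tl' =>
        obtain ⟨t, g, i, j⟩ := x
        have hmin : pvMinFold h' tl' = (t, g, i, j) := min_of_sorted_perm hs hp
        have hfr' : ((h' :: tl').erase (t, g, i, j)).Perm l := by
          have h2 := List.Perm.erase (t, g, i, j) hp.symm
          rwa [List.erase_cons_head] at h2
        simp only [pvLoopA, pvLoopB, hmin]
        by_cases htar : (i, j) = target ∧ g = 1
        · rw [if_pos htar, if_pos htar]
        · rw [if_neg htar, if_neg htar]
          by_cases hseen : PySem.Set.contains seen ((i, j), g) = true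
          · rw [if_pos hseen, if_pos hseen]
            exact ih l _ seen hs.of_cons hfr'.symm
              (fun e he => hG e (List.mem_cons_of_mem _ he))
          · rw [if_neg hseen, if_neg hseen]
            have hGx := hG (t, g, i, j) (List.mem_cons_self ..)
            rw [pvGood_mk] at hGx
            obtain ⟨hi0, hi1, hj0, hj1, hg⟩ := hGx
            have hrt := cell_mem grid hrect hvals hi0 hi1 hj0 hj1
            have hlist : ([(i - 1, j), (i + 1, j), (i, j - 1), (i, j + 1)] : List (Int × Int)) =
                ([((-1 : Int), (0 : Int)), (1, 0), (0, -1), (0, 1)] : List (Int × Int)).map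
                  (fun d => (i + d.1, j + d.2)) := by
              simp [Prod.ext_iff]; omega
            rw [hlist, ngB_eq hrt hg]
            obtain ⟨h1, h2, h3⟩ := fold_perm grid hrect hvals t g i j _ hg hrt
              [((-1 : Int), (0 : Int)), (1, 0), (0, -1), (0, 1)] l ((h' :: tl').erase (t, g, i, j))
              hfr'.symm (fun e he => hG e (List.mem_cons_of_mem _ he)) hs.of_cons
            apply ih
            · exact sorted_heapPush h3
            · exact ((perm_heapPush _ _).trans (h1.cons _)).trans
                (List.perm_append_singleton _ _).symm
            · intro e he
              rcases mem_heapPush.1 he with rfl | he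
              · exact (pvGood_mk ..).mpr ⟨hi0, hi1, hj0, hj1, diff_mem hrt hg⟩
              · exact h2 e he

-- ===== VERDICT (by name: the statement is the Claim_ definition above) =====
theorem search_for_target_spec : Claim_equal_search_for_target := by
  unfold Claim_equal_search_for_target
  intro target grid _ hpre
  unfold Spec_search_for_target search_for_target search_for_target_alt
  obtain ⟨n, hn⟩ : ∃ n, 16 * grid.length * (grid.headD []).length + 16 = n + 1 :=
    ⟨16 * grid.length * (grid.headD []).length + 15, by omega⟩
  rcases hpre with h0 | ⟨hne, hcols, hrect, hvals⟩
  · subst h0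
    rw [hn]
    simp [pvLoopA, pvLoopB, pvMinFold]
  · have hrect' : ∀ row ∈ grid, row.length = (PySem.List.pyGetD grid 0 []).length := by
      rw [pvRow0]; exact hrect
    apply loop_eq target grid hrect' hvals
    · exact List.pairwise_singleton ..
    · exact List.Perm.refl _
    · intro e he
      rcases List.mem_singleton.1 he with rfl
      have hlen : 0 < grid.length := List.length_pos_iff.2 hne
      refine (pvGood_mk ..).mpr ⟨le_refl _, ?_, le_refl _, ?_, Or.inr (Or.inl rfl)⟩
      · exact_mod_cast hlen
      · rw [pvRow0]
        exact_mod_cast hcols
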